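-- pv_equiv track=rewrite | github.com/idarapatrick/multivariate-regression-summative | main.py | age_to_group
-- ===== SOURCE A (Python) =====
-- def age_to_group(age: int) -> str:
--     """Convert age to age group"""
--     age_groups = {
--         (30, 34): '30-34',
--         (35, 39): '35-39',
--         (40, 44): '40-44',
--         (45, 49): '45-49',
--         (50, 54): '50-54',
--         (55, 59): '55-59',
--         (60, 64): '60-64',
--         (65, 69): '65-69',
--         (70, 74): '70-74',
--         (75, 79): '75-79',
--         (80, 120): '80+'
--     }
--
--     for (min_age, max_age), group in age_groups.items():
--         if min_age <= age <= max_age: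
--             return group
--     return '30-34'  # Default fallback
-- ===== SOURCE B (Python) =====
-- def age_to_group(age: int) -> str:
--     """Convert age to age group (closed-form bucket arithmetic instead of scanning a range table)"""
--     if 30 <= age <= 79:
--         lo = 30 + 5 * ((age - 30) // 5)
--         return f"{lo}-{lo + 4}"
--     if 80 <= age <= 120:
--         return '80+'
--     return '30-34'
-- ===== Notes on version B (the rewrite author's own statement) =====
-- stated objective: simpler
-- what changed: Replaces the linear scan over an 11-entry range table with a closed-form arithmetic bucket: the 5-year band is computed directly as 30 + 5*((age-30)//5) and its label formatted, with the 80+ and fallback cases as plain range checks.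
import Mathlib
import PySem

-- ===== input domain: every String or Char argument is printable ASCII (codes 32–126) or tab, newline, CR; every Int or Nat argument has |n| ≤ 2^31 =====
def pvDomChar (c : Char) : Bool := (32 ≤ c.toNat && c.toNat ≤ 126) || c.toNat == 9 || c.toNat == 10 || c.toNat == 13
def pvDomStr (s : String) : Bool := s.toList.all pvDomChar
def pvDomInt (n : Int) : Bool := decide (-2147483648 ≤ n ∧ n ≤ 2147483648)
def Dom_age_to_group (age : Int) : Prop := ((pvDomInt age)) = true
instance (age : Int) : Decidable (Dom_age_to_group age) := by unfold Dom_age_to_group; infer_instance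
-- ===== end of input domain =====

-- B replaces A's scan of an 11-entry range table by a closed-form arithmetic bucket (objective: simpler).

-- ===== PORT A =====
-- the dict literal of A, as an association list in insertion order
def ageGroupTable : List ((Int × Int) × String) :=
  [((30, 34), "30-34"), ((35, 39), "35-39"), ((40, 44), "40-44"), ((45, 49), "45-49"),
   ((50, 54), "50-54"), ((55, 59), "55-59"), ((60, 64), "60-64"), ((65, 69), "65-69"),
   ((70, 74), "70-74"), ((75, 79), "75-79"), ((80, 120), "80+")]

-- the 'for … if … return' loop: first matching entry, else the fallback
def ageGroupScan (age : Int) : List ((Int × Int) × String) → String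
  | [] => "30-34"
  | ((mn, mx), g) :: rest => if mn ≤ age ∧ age ≤ mx then g else ageGroupScan age rest

def age_to_group (age : Int) : String := ageGroupScan age ageGroupTable

-- ===== PORT B =====
def age_to_group_alt (age : Int) : String :=
  if 30 ≤ age ∧ age ≤ 79 then
    let lo := 30 + 5 * PySem.Int.floordiv (age - 30) 5
    PySem.Int.toStr lo ++ "-" ++ PySem.Int.toStr (lo + 4)
  else if 80 ≤ age ∧ age ≤ 120 then "80+"
  else "30-34"

-- ===== PRECONDITION & SPEC =====
def Spec_age_to_group (age : Int) (out : String) : Prop := out = age_to_group_alt age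
instance (age : Int) (out : String) : Decidable (Spec_age_to_group age out) := by unfold Spec_age_to_group; infer_instance

-- ===== CLAIM (what is proved, stated in full; the proofs are below) =====
def Claim_equal_age_to_group : Prop := ∀ (age : Int), Dom_age_to_group age → Spec_age_to_group age (age_to_group age)

-- ===== LEMMAS AND PROOFS =====
-- one step of A's scan: non-matching entry skipped, matching entry returned
lemma scan_neg (age mn mx : Int) (g : String) (rest : List ((Int × Int) × String))
    (h : ¬(mn ≤ age ∧ age ≤ mx)) :
    ageGroupScan age (((mn, mx), g) :: rest) = ageGroupScan age rest := by
  simp only [ageGroupScan]; rw [if_neg h]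

lemma scan_pos (age mn mx : Int) (g : String) (rest : List ((Int × Int) × String))
    (h : mn ≤ age ∧ age ≤ mx) :
    ageGroupScan age (((mn, mx), g) :: rest) = g := by
  simp only [ageGroupScan]; rw [if_pos h]

-- in each 5-year band, B's floor division picks the band index
lemma alt_band (age k : Int) (hk : PySem.Int.floordiv (age - 30) 5 = k)
    (h1 : 30 ≤ age) (h2 : age ≤ 79) :
    age_to_group_alt age
      = PySem.Int.toStr (30 + 5 * k) ++ "-" ++ PySem.Int.toStr (30 + 5 * k + 4) := by
  unfold age_to_group_alt
  rw [if_pos ⟨h1, h2⟩]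
  show PySem.Int.toStr (30 + 5 * PySem.Int.floordiv (age - 30) 5) ++ "-"
      ++ PySem.Int.toStr (30 + 5 * PySem.Int.floordiv (age - 30) 5 + 4) = _
  rw [hk]

-- ===== VERDICT (by name: the statement is the Claim_ definition above) =====
theorem age_to_group_spec : Claim_equal_age_to_group := by
  intro age _
  unfold Spec_age_to_group
  by_cases h79 : 30 ≤ age ∧ age ≤ 79
  · obtain ⟨hlo, hhi⟩ := h79
    obtain ⟨k, hk, h1, h2⟩ :
        ∃ k, PySem.Int.floordiv (age - 30) 5 = k ∧ 30 + 5 * k ≤ age ∧ age ≤ 34 + 5 * k := by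
      refine ⟨_, rfl, ?_, ?_⟩ <;>
        · have hdm := PySem.Int.floordiv_mul_add_mod (age - 30) 5
          have hm0 := PySem.Int.mod_nonneg (age - 30) (by norm_num : (0:Int) < 5)
          have hm5 := PySem.Int.mod_lt (age - 30) (by norm_num : (0:Int) < 5)
          omega
    have hka : 0 ≤ k := by omega
    have hkb : k ≤ 9 := by omega
    interval_cases k <;>
      · rw [alt_band age _ hk hlo hhi]
        simp only [age_to_group, ageGroupTable]
        repeat rw [scan_neg _ _ _ _ _ (by omega)]
        rw [scan_pos _ _ _ _ _ ⟨by omega, by omega⟩]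
        rfl
  · simp only [age_to_group, age_to_group_alt, ageGroupTable]
    rw [if_neg h79]
    by_cases h120 : 80 ≤ age ∧ age ≤ 120
    · rw [if_pos h120]
      repeat rw [scan_neg _ _ _ _ _ (by omega)]
      rw [scan_pos _ _ _ _ _ h120]
    · rw [if_neg h120]
      repeat rw [scan_neg _ _ _ _ _ (by omega)]
      rfl
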